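-- pv_equiv track=rewrite | github.com/philhassey/tinypy | tinypy/encode.py | p_filter
-- ===== SOURCE A (Python) =====
-- def p_filter(items):
--     a,b,c,d = [],[],None,None
--     for t in items:
--         if t['type'] == 'symbol' and t['val'] == '=': b.append(t)
--         elif t['type'] == 'args': c = t
--         elif t['type'] == 'nargs': d = t
--         else: a.append(t)
--     return a,b,c,d
-- ===== SOURCE B (Python) =====
-- def p_filter(items):
--     def is_eq(t):
--         return t['type'] == 'symbol' and t['val'] == '='
--     b = [t for t in items if is_eq(t)]
--     a = [t for t in items
--          if not is_eq(t) and t['type'] != 'args' and t['type'] != 'nargs']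
--     c = next((t for t in reversed(items) if t['type'] == 'args'), None)
--     d = next((t for t in reversed(items) if t['type'] == 'nargs'), None)
--     return a, b, c, d
-- ===== Notes on version B (the rewrite author's own statement) =====
-- stated objective: alternative
-- what changed: Replaces A's single classifying loop with a shared accumulator by four independent passes: two filter comprehensions for the list buckets and two reverse scans that stop at the first (i.e. last) 'args'/'nargs' token.
import Mathlib
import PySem

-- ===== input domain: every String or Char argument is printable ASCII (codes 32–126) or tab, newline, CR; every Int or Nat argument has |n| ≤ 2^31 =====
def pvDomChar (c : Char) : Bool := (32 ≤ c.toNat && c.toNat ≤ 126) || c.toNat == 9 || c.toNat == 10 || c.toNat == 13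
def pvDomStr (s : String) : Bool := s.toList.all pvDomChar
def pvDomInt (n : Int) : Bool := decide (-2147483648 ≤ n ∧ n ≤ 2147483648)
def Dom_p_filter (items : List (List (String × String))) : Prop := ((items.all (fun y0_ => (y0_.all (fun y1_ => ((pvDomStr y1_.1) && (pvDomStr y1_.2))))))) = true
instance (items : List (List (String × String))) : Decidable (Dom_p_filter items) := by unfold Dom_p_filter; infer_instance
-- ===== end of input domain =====

-- B is an alternative decomposition: four independent passes (two filters, two reverse scans) instead of A's one classifying loop.
-- ===== PORT A =====
-- t['k'] on an association list: first match (none = KeyError, excluded by Pre_)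
def tokGet? (t : List (String × String)) (k : String) : Option String :=
  (t.find? (fun p => p.1 == k)).map (·.2)

-- the body of A's for-loop (one classifying step on the state (a,b,c,d))
def stepA (st : (List (List (String × String))) × (List (List (String × String))) × (Option (List (String × String))) × (Option (List (String × String)))) (t : List (String × String)) : (List (List (String × String))) × (List (List (String × String))) × (Option (List (String × String))) × (Option (List (String × String))) :=
  let (a, b, c, d) := st
  if tokGet? t "type" == some "symbol" && tokGet? t "val" == some "=" then (a, b ++ [t], c, d)
  else if tokGet? t "type" == some "args" then (a, b, some t, d)
  else if tokGet? t "type" == some "nargs" then (a, b, c, some t)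
  else (a ++ [t], b, c, d)

def p_filter (items : List (List (String × String))) : (List (List (String × String))) × (List (List (String × String))) × (Option (List (String × String))) × (Option (List (String × String))) :=
  items.foldl stepA ([], [], none, none)

-- ===== PORT B =====
def isEqTok (t : List (String × String)) : Bool :=
  tokGet? t "type" == some "symbol" && tokGet? t "val" == some "="

def p_filter_alt (items : List (List (String × String))) : (List (List (String × String))) × (List (List (String × String))) × (Option (List (String × String))) × (Option (List (String × String))) :=
  let b := items.filter isEqTok
  let a := items.filter (fun t => !isEqTok t && !(tokGet? t "type" == some "args") && !(tokGet? t "type" == some "nargs"))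
  let c := items.reverse.find? (fun t => tokGet? t "type" == some "args")
  let d := items.reverse.find? (fun t => tokGet? t "type" == some "nargs")
  (a, b, c, d)

-- ===== PRECONDITION & SPEC =====
-- Pre_ excludes tokens that would make Python raise KeyError: every token needs a 'type' key,
-- and a 'symbol' token additionally needs a 'val' key.
def Pre_p_filter (items : List (List (String × String))) : Prop :=
  ∀ t ∈ items, (tokGet? t "type").isSome ∧
    (tokGet? t "type" = some "symbol" → (tokGet? t "val").isSome)
instance (items : List (List (String × String))) : Decidable (Pre_p_filter items) := by unfold Pre_p_filter; infer_instance
def pvWitness_p_filter : (List (List (String × String))) :=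
  [[("type", "symbol"), ("val", "=")], [("type", "args"), ("val", "x")], [("type", "name"), ("val", "y")]]
def Spec_p_filter (items : List (List (String × String))) (out : (List (List (String × String))) × (List (List (String × String))) × (Option (List (String × String))) × (Option (List (String × String)))) : Prop := out = p_filter_alt items
instance (items : List (List (String × String))) (out : (List (List (String × String))) × (List (List (String × String))) × (Option (List (String × String))) × (Option (List (String × String)))) : Decidable (Spec_p_filter items out) := by unfold Spec_p_filter; infer_instance

-- ===== CLAIM (what is proved, stated in full; the proofs are below) =====
def Claim_equal_p_filter : Prop := ∀ (items : List (List (String × String))), Dom_p_filter items → Pre_p_filter items → Spec_p_filter items (p_filter items)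

-- ===== LEMMAS AND PROOFS =====
lemma p_filter_fold (items : List (List (String × String)))
    (a b : List (List (String × String))) (c d : Option (List (String × String))) :
    items.foldl stepA (a, b, c, d)
    = (a ++ items.filter (fun t => !isEqTok t && !(tokGet? t "type" == some "args") && !(tokGet? t "type" == some "nargs")),
       b ++ items.filter isEqTok,
       (items.reverse.find? (fun t => tokGet? t "type" == some "args")).or c,
       (items.reverse.find? (fun t => tokGet? t "type" == some "nargs")).or d) := by
  induction items generalizing a b c d with
  | nil => simp
  | cons t ts ih =>
    by_cases h1 : (tokGet? t "type" == some "symbol" && tokGet? t "val" == some "=") = true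
    · have h2 : (tokGet? t "type" == some "args") = false := by
        rcases Bool.and_eq_true .. |>.mp h1 with ⟨hs, _⟩; simp_all
      have h3 : (tokGet? t "type" == some "nargs") = false := by
        rcases Bool.and_eq_true .. |>.mp h1 with ⟨hs, _⟩; simp_all
      have hs : stepA (a, b, c, d) t = (a, b ++ [t], c, d) := by simp [stepA, h1]
      rw [List.foldl_cons, hs, ih]
      simp [isEqTok, h1, h2, h3, List.filter_cons, List.find?_append]
      simpa only [Bool.and_eq_true, beq_iff_eq] using h1
    · by_cases h2 : (tokGet? t "type" == some "args") = true
      · have h3 : (tokGet? t "type" == some "nargs") = false := by simp_all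
        have hs : stepA (a, b, c, d) t = (a, b, some t, d) := by simp [stepA, h1, h2]
        rw [List.foldl_cons, hs, ih]
        simp [isEqTok, h1, h2, h3, List.find?_append]
      · by_cases h3 : (tokGet? t "type" == some "nargs") = true
        · have hs : stepA (a, b, c, d) t = (a, b, c, some t) := by simp [stepA, h1, h2, h3]
          rw [List.foldl_cons, hs, ih]
          simp [isEqTok, h1, h2, h3, List.find?_append]
        · have hs : stepA (a, b, c, d) t = (a ++ [t], b, c, d) := by simp [stepA, h1, h2, h3]
          rw [List.foldl_cons, hs, ih]
          simp [isEqTok, h1, h2, h3, List.filter_cons, List.find?_append]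
          intro hty hval
          exact h1 (by simp [hty, hval])

-- ===== VERDICT (by name: the statement is the Claim_ definition above) =====
theorem p_filter_spec : Claim_equal_p_filter := by
  intro items _ _
  unfold Spec_p_filter p_filter p_filter_alt
  simpa using p_filter_fold items [] [] none none
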